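-- pv_equiv track=rewrite | github.com/posl/comment_recommendation | script/split_gen/1_time/en/115_D/3.py | burger
-- ===== SOURCE A (Python) =====
-- def burger(n, x):
--     if n == 0:
--         return 1 if x >= 1 else 0
--     elif x == 1:
--         return 0
--     elif x <= 1 + burger(n-1, 0):
--         return burger(n-1, x-1)
--     elif x == 2 + burger(n-1, 0):
--         return 1 + burger(n-1, 0)
--     else:
--         return 1 + burger(n-1, 0) + burger(n-1, x-2-burger(n-1, 0))
-- ===== SOURCE B (Python) =====
-- def burger(n, x):
--     # Closed form: unrolling A's recursion removes each layer's constant-0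
--     # subcalls burger(m,0), leaving "subtract 2 from x, add 1" n times.
--     if n == 0:
--         return 1 if x >= 1 else 0
--     if x <= 1:
--         return 0
--     half = x // 2
--     if half > n:
--         return n + 1
--     return half + (1 if (x % 2 == 1 and half == n) else 0)
-- ===== Notes on version B (the rewrite author's own statement) =====
-- stated objective: faster
-- what changed: Replaced A's branching recursion (whose burger(n-1,0) subcalls are always 0, making it exponential in n) by an O(1) closed form: x//2 layers plus boundary corrections; intended as faster — a timing run measured B 599x faster at the largest size A still finished (A timed out beyond).
import Mathlib
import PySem

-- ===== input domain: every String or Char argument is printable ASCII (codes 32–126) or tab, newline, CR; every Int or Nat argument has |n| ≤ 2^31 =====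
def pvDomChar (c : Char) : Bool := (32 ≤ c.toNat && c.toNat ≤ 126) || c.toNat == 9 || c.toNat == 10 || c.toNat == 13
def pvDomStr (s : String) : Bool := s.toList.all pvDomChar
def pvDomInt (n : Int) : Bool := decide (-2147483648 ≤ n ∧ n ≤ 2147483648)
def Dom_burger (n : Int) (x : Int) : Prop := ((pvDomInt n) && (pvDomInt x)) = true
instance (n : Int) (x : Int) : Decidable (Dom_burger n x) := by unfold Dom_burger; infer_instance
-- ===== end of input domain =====

-- B replaces A's exponential recursion by a closed form (intended as faster; a timing run measured B 599x faster at the largest size A still finished, A timed out beyond).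

-- ===== PORT A =====
-- literal transliteration of A's recursion for nonnegative level counts;
-- the Nat first argument is the recursion depth n (A recurses on n-1 until 0)
def burgerAux : Nat → Int → Int
  | 0, x => if x ≥ 1 then 1 else 0
  | Nat.succ m, x =>
    if x = 1 then 0
    else if x ≤ 1 + burgerAux m 0 then burgerAux m (x - 1)
    else if x = 2 + burgerAux m 0 then 1 + burgerAux m 0
    else 1 + burgerAux m 0 + burgerAux m (x - 2 - burgerAux m 0)

-- A's top level: for n < 0 with x ≠ 1 the Python recursion never terminates
-- (excluded by Pre_burger); on Pre_burger this matches A's branch structure exactly.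
def burger (n : Int) (x : Int) : Int :=
  if n = 0 then (if x ≥ 1 then 1 else 0)
  else if x = 1 then 0
  else
    let m := (n - 1).toNat
    if x ≤ 1 + burgerAux m 0 then burgerAux m (x - 1)
    else if x = 2 + burgerAux m 0 then 1 + burgerAux m 0
    else 1 + burgerAux m 0 + burgerAux m (x - 2 - burgerAux m 0)

-- ===== PORT B =====
def burger_alt (n : Int) (x : Int) : Int :=
  if n = 0 then (if x ≥ 1 then 1 else 0)
  else if x ≤ 1 then 0
  else
    let half := PySem.Int.floordiv x 2
    if half > n then n + 1
    else half + (if PySem.Int.mod x 2 = 1 ∧ half = n then 1 else 0)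

-- ===== PRECONDITION & SPEC =====
-- Pre_ excludes exactly the inputs where A never returns: for n < 0 the recursion
-- burger(n-1, …) descends forever unless the x == 1 branch fires first (RecursionError).
def Pre_burger (n : Int) (x : Int) : Prop := 0 ≤ n ∨ x = 1
instance (n : Int) (x : Int) : Decidable (Pre_burger n x) := by unfold Pre_burger; infer_instance
def pvWitness_burger : Int × Int := (3, 7)

def Spec_burger (n : Int) (x : Int) (out : Int) : Prop := out = burger_alt n x
instance (n : Int) (x : Int) (out : Int) : Decidable (Spec_burger n x out) := by unfold Spec_burger; infer_instance

-- ===== CLAIM (what is proved, stated in full; the proofs are below) =====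
def Claim_equal_burger : Prop := ∀ (n : Int) (x : Int), Dom_burger n x → Pre_burger n x → Spec_burger n x (burger n x)

-- ===== LEMMAS AND PROOFS =====

-- every subcall with nonpositive x returns 0
theorem burgerAux_nonpos : ∀ (m : Nat), ∀ (x : Int), x ≤ 0 → burgerAux m x = 0 := by
  intro m
  induction m with
  | zero => intro x hx; simp [burgerAux]; omega
  | succ m ih =>
    intro x hx
    have h0 : burgerAux m 0 = 0 := ih 0 le_rfl
    simp only [burgerAux, h0]
    rw [if_neg (by omega), if_pos (by omega)]
    exact ih (x - 1) (by omega)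

theorem burgerAux_zero (m : Nat) : burgerAux m 0 = 0 := burgerAux_nonpos m 0 le_rfl

-- closed form for A's recursion
theorem burgerAux_eq_alt : ∀ (m : Nat), ∀ (x : Int), burgerAux m x = burger_alt (m : Int) x := by
  intro m
  induction m with
  | zero => intro x; simp [burgerAux, burger_alt]
  | succ m ih =>
    intro x
    have hn : ((m : Int) + 1) ≠ 0 := by omega
    by_cases hx1 : x ≤ 1
    · -- both sides are 0
      rcases lt_or_eq_of_le hx1 with h | h
      · rw [burgerAux_nonpos (m + 1) x (by omega)]
        simp only [burger_alt, Nat.cast_succ]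
        rw [if_neg hn, if_pos (by omega)]
      · subst h
        simp [burgerAux, burger_alt, Nat.cast_succ, hn]
    · have h0 : burgerAux m 0 = 0 := burgerAux_zero m
      simp only [burgerAux, h0, add_zero, sub_zero]
      rw [if_neg (by omega), if_neg (by omega), ih (x - 2)]
      simp only [burger_alt, Nat.cast_succ,
        PySem.Int.floordiv_eq_ediv_of_pos (show (0:Int) < 2 by omega),
        PySem.Int.mod_eq_emod_of_pos (show (0:Int) < 2 by omega)]
      split_ifs <;> omega

-- for n > 0 and x ≠ 1 the top level of A is one unfolding of burgerAux at n.toNat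
theorem burger_pos (n : Int) (x : Int) (hn : 0 < n) (hx : x ≠ 1) :
    burger n x = burgerAux n.toNat x := by
  have hm : n.toNat = (n - 1).toNat + 1 := by omega
  rw [hm]
  simp only [burger, burgerAux]
  rw [if_neg (by omega), if_neg hx]

-- ===== VERDICT (by name: the statement is the Claim_ definition above) =====
theorem burger_spec : Claim_equal_burger := by
  intro n x _ hpre
  unfold Spec_burger
  by_cases hn0 : n = 0
  · subst hn0; simp [burger, burger_alt]
  · by_cases hx1 : x = 1
    · subst hx1
      simp [burger, burger_alt, hn0]
    · have hn : 0 < n := by rcases hpre with h | h; omega; exact absurd h hx1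
      rw [burger_pos n x hn hx1, burgerAux_eq_alt]
      congr 1
      omega
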